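-- pv_equiv track=rewrite | github.com/Nakiros/pyArduino | pyArd/lessons/lesson10_AutoConnect_module.py | findArduino
-- ===== SOURCE A (Python) =====
-- def findArduino(portsFound,Ard_Name):
--     commPort='None'
--     numConnection = len(portsFound)
--
--     for i in range(0,numConnection):
--         port = portsFound[i]
--         strPort=str(port)
--
--         if Ard_Name in strPort:
--             splitPort=strPort.split(' ')
--             commPort = (splitPort[0])
--
--     return commPort
-- ===== SOURCE B (Python) =====
-- def findArduino(portsFound, Ard_Name):
--     # Reverse early-exit scan: the last forward match is the first reverse match.
--     for port in reversed(portsFound):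
--         strPort = str(port)
--         if Ard_Name in strPort:
--             return strPort.split(' ')[0]
--     return 'None'
-- ===== Notes on version B (the rewrite author's own statement) =====
-- stated objective: alternative
-- what changed: Replaces the scan-all-and-overwrite index loop with an early-exit traversal in reverse order that returns the first (i.e. last forward) match's first token immediately, with no accumulator.
import Mathlib
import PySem

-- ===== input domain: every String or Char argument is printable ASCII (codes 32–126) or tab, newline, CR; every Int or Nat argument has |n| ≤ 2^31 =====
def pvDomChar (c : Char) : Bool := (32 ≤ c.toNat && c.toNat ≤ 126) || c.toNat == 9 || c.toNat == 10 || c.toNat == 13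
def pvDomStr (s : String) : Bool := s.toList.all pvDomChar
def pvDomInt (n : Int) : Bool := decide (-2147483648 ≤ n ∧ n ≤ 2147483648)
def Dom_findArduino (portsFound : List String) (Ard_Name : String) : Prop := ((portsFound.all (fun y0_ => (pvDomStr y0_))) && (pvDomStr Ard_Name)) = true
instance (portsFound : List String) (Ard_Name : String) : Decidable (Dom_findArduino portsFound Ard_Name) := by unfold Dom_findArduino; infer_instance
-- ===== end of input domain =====

-- B replaces A's overwrite-last accumulator loop by an early-exit reverse traversal (alternative decomposition, same cost).

-- ===== PORT A =====
-- index loop: for i in range(0, len(portsFound)): port = portsFound[i]; if Ard_Name in port: commPort = port.split(' ')[0]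
def findArduino (portsFound : List String) (Ard_Name : String) : String :=
  (PySem.List.pyRange 0 (PySem.List.len portsFound) 1).foldl
    (fun commPort i =>
      let strPort := PySem.List.pyGetD portsFound i ""   -- index always in range here
      if PySem.Str.isIn Ard_Name strPort then
        ((PySem.Str.split? strPort " ").getD []).headD ""          -- split(' ')[0]; splitOn is never empty
      else commPort)
    "None"

-- ===== PORT B =====
def findArduino_alt (portsFound : List String) (Ard_Name : String) : String :=
  match portsFound.reverse.find? (fun p => PySem.Str.isIn Ard_Name p) with
  | some p => ((PySem.Str.split? p " ").getD []).headD ""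
  | none => "None"

-- ===== PRECONDITION & SPEC =====
def Spec_findArduino (portsFound : List String) (Ard_Name : String) (out : String) : Prop := out = findArduino_alt portsFound Ard_Name
instance (portsFound : List String) (Ard_Name : String) (out : String) : Decidable (Spec_findArduino portsFound Ard_Name out) := by unfold Spec_findArduino; infer_instance

-- ===== CLAIM (what is proved, stated in full; the proofs are below) =====
def Claim_equal_findArduino : Prop := ∀ (portsFound : List String) (Ard_Name : String), Dom_findArduino portsFound Ard_Name → Spec_findArduino portsFound Ard_Name (findArduino portsFound Ard_Name)

-- ===== LEMMAS AND PROOFS =====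

-- an overwrite-on-match fold equals the first match of the reversed list
theorem foldl_overwrite_eq_reverse_find {α β : Type} (pred : α → Bool) (g : α → β)
    (xs : List α) (init : β) :
    xs.foldl (fun acc p => if pred p then g p else acc) init
      = (xs.reverse.find? pred).elim init g := by
  induction xs generalizing init with
  | nil => rfl
  | cons x xs ih =>
    simp only [List.foldl_cons, List.reverse_cons, List.find?_append, ih]
    cases h : xs.reverse.find? pred with
    | some p => simp
    | none =>
      simp only [Option.none_or, List.find?_singleton]
      by_cases hx : pred x = true <;> simp [hx]

-- ===== VERDICT (by name: the statement is the Claim_ definition above) =====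
theorem findArduino_spec : Claim_equal_findArduino := by
  intro portsFound Ard_Name _
  unfold Spec_findArduino findArduino findArduino_alt
  rw [PySem.List.foldl_pyRange_zero_pyGetD portsFound ""
        (fun acc p => if PySem.Str.isIn Ard_Name p then ((PySem.Str.split? p " ").getD []).headD "" else acc) "None",
      foldl_overwrite_eq_reverse_find]
  cases h : portsFound.reverse.find? (fun p => PySem.Str.isIn Ard_Name p) <;> rfl
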